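-- pv_equiv track=rewrite | github.com/JacobLMiller/jacob-advent-code-solutions | 2016/14/code.py | check_trip
-- ===== SOURCE A (Python) =====
-- def check_trip(s,l, t=None):
--     n = len(s)
--     for i in range(n-l+1):
--         chars = s[i:i+l]
--         targ = t if t else chars[0]
--         if all(targ == c for c in chars):
--             return chars[0]
--     return None
-- ===== SOURCE B (Python) =====
-- def check_trip(s, l, t=None):
--     # single pass tracking the length of the current consecutive run
--     run = 0
--     prev = None
--     for c in s:
--         if t:
--             run = run + 1 if c == t else 0
--         else:
--             run = run + 1 if c == prev else 1
--             prev = c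
--         if run >= l:
--             return c
--     return None
-- ===== Notes on version B (the rewrite author's own statement) =====
-- stated objective: faster
-- what changed: replaces the O(n*l) restart-a-window-scan-at-every-index algorithm by a single left-to-right pass that maintains the length of the current consecutive run and returns as soon as it reaches l
-- outside the precondition, e.g. on check_trip('abbbbb', -3, None): A returns 'b', B returns 'a'
import Mathlib
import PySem

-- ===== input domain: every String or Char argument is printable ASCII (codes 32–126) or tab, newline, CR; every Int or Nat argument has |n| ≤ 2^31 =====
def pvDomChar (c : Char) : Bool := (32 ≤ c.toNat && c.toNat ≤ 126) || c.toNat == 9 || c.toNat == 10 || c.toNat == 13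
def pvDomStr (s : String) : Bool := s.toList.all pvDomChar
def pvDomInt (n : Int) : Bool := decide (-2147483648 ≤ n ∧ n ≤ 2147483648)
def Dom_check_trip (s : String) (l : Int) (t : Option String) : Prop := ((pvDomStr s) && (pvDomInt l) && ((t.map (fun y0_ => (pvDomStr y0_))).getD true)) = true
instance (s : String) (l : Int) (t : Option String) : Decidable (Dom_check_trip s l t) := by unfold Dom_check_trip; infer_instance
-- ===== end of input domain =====

-- B replaces A's restart-a-window-check-at-every-start-index scan by one pass that tracks the
-- length of the current consecutive run (objective: faster, O(n) instead of O(n*l)).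

-- ===== PORT A =====
-- 't if t else chars[0]' as a one-char-string-vs-char comparison list (A-side helper)
def targA (t : Option String) (c0 : Char) : List Char :=
  match t with
  | some ts => if ts.toList = [] then [c0] else ts.toList
  | none => [c0]

-- Faithful port of A's 'for i in range(n-l+1)' loop.  On an empty window Python raises
-- IndexError at chars[0]; those inputs are outside Pre_ and this port returns none there.
def checkTripLoop (cs : List Char) (l : Int) (t : Option String) (i : Int) : Option String :=
  if _h : i < (cs.length : Int) - l + 1 then
    let chars := PySem.List.slice cs (some i) (some (i + l))
    match chars with
    | [] => none                      -- Python: chars[0] raises IndexError (excluded by Pre_)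
    | c0 :: crest =>
      let targ : List Char := targA t c0   -- 't if t else chars[0]'
      if (c0 :: crest).all (fun c => targ = [c]) then some (String.ofList [c0])
      else checkTripLoop cs l t (i + 1)
  else none
termination_by ((cs.length : Int) - l + 1 - i).toNat
decreasing_by omega

def check_trip (s : String) (l : Int) (t : Option String) : Option String :=
  checkTripLoop s.toList l t 0

-- ===== PORT B =====
-- Faithful port of B's single pass with state (run, prev).
def checkTripAltLoop (l : Int) (t : Option String) : List Char → Int → Option Char → Option String
  | [], _, _ => none
  | c :: rest, run, prev =>
    if (t.getD "").toList ≠ [] then        -- 'if t:'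
      let run' : Int := if [c] = (t.getD "").toList then run + 1 else 0
      if l ≤ run' then some (String.ofList [c]) else checkTripAltLoop l t rest run' prev
    else
      let run' : Int := if some c = prev then run + 1 else 1
      if l ≤ run' then some (String.ofList [c]) else checkTripAltLoop l t rest run' (some c)

def check_trip_alt (s : String) (l : Int) (t : Option String) : Option String :=
  checkTripAltLoop l t s.toList 0 none

-- ===== PRECONDITION & SPEC =====
-- Pre_ excludes l ≤ 0: there the window s[i:i+l] degenerates and A raises IndexError at
-- chars[0] on most inputs, and where a negative-l slice happens to be nonempty and uniform A
-- returns an accidental value of the truncated window.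
def Pre_check_trip (s : String) (l : Int) (t : Option String) : Prop := 1 ≤ l
instance (s : String) (l : Int) (t : Option String) : Decidable (Pre_check_trip s l t) := by unfold Pre_check_trip; infer_instance

def pvWitness_check_trip : String × Int × Option String := ("aabbb", 3, none)

def Spec_check_trip (s : String) (l : Int) (t : Option String) (out : Option String) : Prop := out = check_trip_alt s l t
instance (s : String) (l : Int) (t : Option String) (out : Option String) : Decidable (Spec_check_trip s l t out) := by unfold Spec_check_trip; infer_instance

-- ===== CLAIM (what is proved, stated in full; the proofs are below) =====
def Claim_equal_check_trip : Prop := ∀ (s : String) (l : Int) (t : Option String), Dom_check_trip s l t → Pre_check_trip s l t → Spec_check_trip s l t (check_trip s l t)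

-- ===== LEMMAS AND PROOFS =====

-- The common reference scan (proof-only): slide a window of length lN by start index;
-- g = none means 'compare against the window head' (falsy t), g = some tc means 'against tc'.
def scanA (g : Option Char) (lN : Nat) : List Char → Option String
  | [] => none
  | c :: rest =>
    if ((c :: rest).take lN).length = lN ∧ (∀ x ∈ (c :: rest).take lN, x = g.getD c)
    then some (String.ofList [c])
    else scanA g lN rest

-- which comparison target a given t induces; none = multi-char t (never matches)
def gOf (t : Option String) : Option (Option Char) :=
  match t with
  | none => some none
  | some ts =>
    match ts.toList with
    | [] => some none
    | [tc] => some (some tc)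
    | _ => none

lemma scanA_short (g : Option Char) (lN : Nat) :
    ∀ cs : List Char, cs.length < lN → scanA g lN cs = none := by
  intro cs
  induction cs with
  | nil => intro _; simp [scanA]
  | cons c rest ih =>
    intro h
    have hlt : rest.length + 1 < lN := by simpa using h
    rw [scanA, if_neg]
    · exact ih (by omega)
    · rintro ⟨h1, _⟩
      rw [List.length_take] at h1
      simp at h1
      omega

lemma scanA_run_hit (g : Option Char) (a : Char) (lN : Nat) (h1 : 1 ≤ lN)
    (hga : g.getD a = a) (rest : List Char) :
    scanA g lN (List.replicate lN a ++ rest) = some (String.ofList [a]) := by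
  obtain ⟨m, rfl⟩ : ∃ m, lN = m + 1 := ⟨lN - 1, by omega⟩
  have hcons : List.replicate (m + 1) a ++ rest = a :: (List.replicate m a ++ rest) := by
    simp [List.replicate_succ]
  have hw : (a :: (List.replicate m a ++ rest)).take (m + 1) = a :: List.replicate m a := by
    rw [List.take_succ_cons, List.take_left' (by simp)]
  rw [hcons, scanA, if_pos]
  constructor
  · rw [hw]; simp
  · intro x hx
    rw [hw] at hx
    simp [List.mem_replicate] at hx
    rcases hx with h | ⟨_, h⟩ <;> simp [h, hga]

lemma scanA_head_ne (tc c : Char) (lN : Nat) (h1 : 1 ≤ lN) (hne : c ≠ tc) (rest : List Char) :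
    scanA (some tc) lN (c :: rest) = scanA (some tc) lN rest := by
  rw [scanA, if_neg]
  intro ⟨hlen, hall⟩
  have hc : c ∈ (c :: rest).take lN := by
    obtain ⟨m, rfl⟩ : ∃ m, lN = m + 1 := ⟨lN - 1, by omega⟩
    simp [List.take_succ_cons]
  have := hall c hc
  simp at this
  exact hne this

lemma scanA_peel (g : Option Char) (a c : Char) (hga : g.getD a = a) (hca : c ≠ a)
    (lN : Nat) :
    ∀ n : Nat, n < lN → ∀ rest : List Char,
      scanA g lN (List.replicate n a ++ c :: rest) = scanA g lN (c :: rest) := by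
  intro n
  induction n with
  | zero => intro _ rest; simp
  | succ m ih =>
    intro hn rest
    have hcons : List.replicate (m + 1) a ++ c :: rest
        = a :: (List.replicate m a ++ c :: rest) := by simp [List.replicate_succ]
    rw [hcons, scanA, if_neg]
    · exact ih (by omega) rest
    · intro ⟨hlen, hall⟩
      -- the window has length lN > m+1 ≥ the run prefix, so it contains c; but c ≠ a
      have hc : c ∈ (a :: (List.replicate m a ++ c :: rest)).take lN := by
        obtain ⟨k, rfl⟩ : ∃ k, lN = k + 1 := ⟨lN - 1, by omega⟩
        rw [List.take_succ_cons]
        have hsplit : (List.replicate m a ++ c :: rest).take k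
            = List.replicate m a ++ (c :: rest).take (k - m) := by
          rw [List.take_append, List.take_of_length_le (by simp; omega)]
          simp
        rw [hsplit]
        have : c ∈ (c :: rest).take (k - m) := by
          obtain ⟨j, hj⟩ : ∃ j, k - m = j + 1 := ⟨k - m - 1, by omega⟩
          rw [hj, List.take_succ_cons]; simp
        simp [this]
      have := hall c hc
      rw [hga] at this
      exact hca this

-- A's loop from index i computes the reference scan of the i-th tail.
lemma A_bridge (cs : List Char) (l : Int) (t : Option String) (g : Option Char)
    (hg : ∀ c0 x : Char, (targA t c0 = [x]) ↔ (x = g.getD c0)) (hl : 1 ≤ l) :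
    ∀ (k : Nat) (i : Int), 0 ≤ i → cs.length - i.toNat ≤ k →
      checkTripLoop cs l t i = scanA g l.toNat (cs.drop i.toNat) := by
  intro k
  induction k with
  | zero =>
    intro i hi hk
    rw [checkTripLoop, dif_neg (by omega)]
    rw [scanA_short]
    simp [List.length_drop]; omega
  | succ k ih =>
    intro i hi hk
    rw [checkTripLoop]
    by_cases h : i < (cs.length : Int) - l + 1
    · rw [dif_pos h]
      have hlen_i : i.toNat < cs.length := by omega
      have hchars : PySem.List.slice cs (some i) (some (i + l))
          = (cs.drop i.toNat).take l.toNat := by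
        rw [PySem.List.slice_toNat cs hi (by omega)]
        congr 1; omega
      have hds : l.toNat ≤ (cs.drop i.toNat).length := by
        simp [List.length_drop]; omega
      obtain ⟨d, ds', hcons⟩ : ∃ d ds', cs.drop i.toNat = d :: ds' := by
        cases hds' : cs.drop i.toNat with
        | nil => exfalso; rw [hds'] at hds; simp at hds; omega
        | cons d ds' => exact ⟨d, ds', rfl⟩
      rw [hchars, hcons]
      have hlN : 1 ≤ l.toNat := by omega
      obtain ⟨m, hm⟩ : ∃ m, l.toNat = m + 1 := ⟨l.toNat - 1, by omega⟩
      rw [hm, List.take_succ_cons]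
      -- the window
      have hwlen : (d :: ds'.take m).length = m + 1 := by
        rw [hcons] at hds
        simp [List.length_take] at hds ⊢
        omega
      by_cases hcond : (d :: ds'.take m).all (fun c => targA t d = [c])
      · simp only [hcond, if_true]
        have hOK : ((d :: ds').take (m + 1)).length = m + 1 ∧
            ∀ x ∈ (d :: ds').take (m + 1), x = g.getD d := by
          rw [List.take_succ_cons]
          refine ⟨hwlen, ?_⟩
          intro x hx
          simp only [List.all_eq_true, decide_eq_true_eq] at hcond
          exact (hg d x).mp (hcond x hx)
        rw [scanA, if_pos hOK]
      · simp only [hcond]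
        have hnOK : ¬ (((d :: ds').take (m + 1)).length = m + 1 ∧
            ∀ x ∈ (d :: ds').take (m + 1), x = g.getD d) := by
          rw [List.take_succ_cons]
          rintro ⟨hlen', hall'⟩
          simp only [List.all_eq_true, decide_eq_true_eq] at hcond
          apply hcond
          intro x hx
          exact (hg d x).mpr (hall' x hx)
        rw [scanA, if_neg hnOK]
        have hdrop : cs.drop (i + 1).toNat = ds' := by
          have h1 : (i + 1).toNat = i.toNat + 1 := by omega
          rw [h1, ← List.drop_drop, hcons]
          simp
        rw [ih (i + 1) (by omega) (by simp; omega), hdrop, hm]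
        simp
    · rw [dif_neg h]
      rw [scanA_short]
      simp [List.length_drop]; omega

-- multi-character truthy t: A never matches (string-vs-char comparison), returns None
lemma A_multi (cs : List Char) (l : Int) (ts : String) (a b : Char) (bs : List Char)
    (hts : ts.toList = a :: b :: bs) :
    ∀ (k : Nat) (i : Int), ((cs.length : Int) - l + 1 - i).toNat ≤ k →
      checkTripLoop cs l (some ts) i = none := by
  intro k
  induction k with
  | zero =>
    intro i hk
    rw [checkTripLoop, dif_neg (by omega)]
  | succ k ih =>
    intro i hk
    rw [checkTripLoop]
    by_cases h : i < (cs.length : Int) - l + 1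
    · rw [dif_pos h]
      cases hc : PySem.List.slice cs (some i) (some (i + l)) with
      | nil => simp
      | cons c0 crest =>
        have hfalse : ((c0 :: crest).all fun c => decide (targA (some ts) c0 = [c])) = false := by
          simp [targA, hts]
        simp only [hfalse, Bool.false_eq_true, if_false]
        exact ih (i + 1) (by omega)
    · rw [dif_neg h]

-- multi-character truthy t: B's run never grows, returns None
lemma B_multi (l : Int) (ts : String) (a b : Char) (bs : List Char)
    (hts : ts.toList = a :: b :: bs) (hl : 1 ≤ l) :
    ∀ (rest : List Char) (run : Int) (prev : Option Char),
      checkTripAltLoop l (some ts) rest run prev = none := by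
  intro rest
  induction rest with
  | nil => intro run prev; rfl
  | cons c rest' ih =>
    intro run prev
    have hl0 : ¬ l ≤ (0 : Int) := by omega
    have hstep : checkTripAltLoop l (some ts) (c :: rest') run prev
        = checkTripAltLoop l (some ts) rest' 0 prev := by
      rw [checkTripAltLoop]; simp [hts, hl0]
    rw [hstep]
    exact ih 0 prev

-- single-character truthy t = tc: B's state run counts the trailing tc-run
lemma B_truthy (l : Int) (ts : String) (tc : Char) (hts : ts.toList = [tc]) (hl : 1 ≤ l) :
    ∀ (rest : List Char) (run : Int) (prev : Option Char), 0 ≤ run → run ≤ l - 1 →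
      checkTripAltLoop l (some ts) rest run prev
        = scanA (some tc) l.toNat (List.replicate run.toNat tc ++ rest) := by
  intro rest
  induction rest with
  | nil =>
    intro run prev h0 h1
    rw [scanA_short (some tc) l.toNat _ (by simp; omega)]
    rfl
  | cons c rest' ih =>
    intro run prev h0 h1
    by_cases hc : c = tc
    · subst hc
      by_cases hhit : l ≤ run + 1
      · have hstep : checkTripAltLoop l (some ts) (c :: rest') run prev
            = some (String.ofList [c]) := by
          rw [checkTripAltLoop]; simp [hts, hhit]
        rw [hstep]
        have hrep : List.replicate run.toNat c ++ c :: rest'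
            = List.replicate l.toNat c ++ rest' := by
          have h2 : l.toNat = run.toNat + 1 := by omega
          rw [h2, List.replicate_succ']; simp
        rw [hrep, scanA_run_hit (some c) c l.toNat (by omega) (by simp)]
      · have hstep : checkTripAltLoop l (some ts) (c :: rest') run prev
            = checkTripAltLoop l (some ts) rest' (run + 1) prev := by
          rw [checkTripAltLoop]; simp [hts, hhit]
        rw [hstep, ih (run + 1) prev (by omega) (by omega)]
        congr 1
        have h2 : (run + 1).toNat = run.toNat + 1 := by omega
        rw [h2, List.replicate_succ']; simp
    · have hl0 : ¬ l ≤ (0 : Int) := by omega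
      have hstep : checkTripAltLoop l (some ts) (c :: rest') run prev
          = checkTripAltLoop l (some ts) rest' 0 prev := by
        rw [checkTripAltLoop]; simp [hts, hc, hl0]
      rw [hstep, ih 0 prev (by omega) (by omega)]
      rw [scanA_peel (some tc) tc c (by simp) hc l.toNat run.toNat (by omega)]
      rw [scanA_head_ne tc c l.toNat (by omega) hc]
      simp

-- falsy t: B's state (run, prev) records the maximal constant suffix seen so far
lemma B_falsy (l : Int) (t : Option String) (ht : (t.getD "").toList = []) (hl : 1 ≤ l) :
    ∀ (rest : List Char) (run : Int) (prev : Option Char),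
      ((prev = none ∧ run = 0) ∨ (∃ p, prev = some p ∧ 1 ≤ run ∧ run ≤ l - 1)) →
      checkTripAltLoop l t rest run prev
        = scanA none l.toNat
            ((match prev with | none => ([] : List Char) | some p => List.replicate run.toNat p) ++ rest) := by
  intro rest
  induction rest with
  | nil =>
    intro run prev hst
    rw [scanA_short none l.toNat _ ?_]
    · cases rest_eq : t <;> rfl
    · rcases hst with ⟨hp, hr⟩ | ⟨p, hp, hr1, hr2⟩ <;> subst hp <;> simp <;> omega
  | cons c rest' ih =>
    intro run prev hst
    by_cases hmatch : some c = prev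
    · obtain ⟨p, hp, hr1, hr2⟩ : ∃ p, prev = some p ∧ 1 ≤ run ∧ run ≤ l - 1 := by
        rcases hst with ⟨hp, _⟩ | h
        · exact absurd (hp ▸ hmatch) (by simp)
        · exact h
      have hcp : c = p := by rw [hp] at hmatch; exact Option.some.inj hmatch
      subst hcp hp
      by_cases hhit : l ≤ run + 1
      · have hstep : checkTripAltLoop l t (c :: rest') run (some c)
            = some (String.ofList [c]) := by
          rw [checkTripAltLoop]; simp [ht, hhit]
        rw [hstep]
        have hrep : List.replicate run.toNat c ++ c :: rest'
            = List.replicate l.toNat c ++ rest' := by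
          have h2 : l.toNat = run.toNat + 1 := by omega
          rw [h2, List.replicate_succ']; simp
        rw [hrep, scanA_run_hit none c l.toNat (by omega) (by simp)]
      · have hstep : checkTripAltLoop l t (c :: rest') run (some c)
            = checkTripAltLoop l t rest' (run + 1) (some c) := by
          rw [checkTripAltLoop]; simp [ht, hhit]
        rw [hstep, ih (run + 1) (some c) (Or.inr ⟨c, rfl, by omega, by omega⟩)]
        dsimp only
        congr 1
        have h2 : (run + 1).toNat = run.toNat + 1 := by omega
        rw [h2, List.replicate_succ']; simp
    · by_cases hhit : l ≤ (1 : Int)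
      · have hl1 : l = 1 := by omega
        have hprev : prev = none := by
          rcases hst with ⟨hp, _⟩ | ⟨p, hp, h1, h2⟩
          · exact hp
          · exfalso; omega
        subst hprev
        have hstep : checkTripAltLoop l t (c :: rest') run none
            = some (String.ofList [c]) := by
          rw [checkTripAltLoop]; simp [ht, hhit]
        rw [hstep]
        have hrep : (c :: rest') = List.replicate l.toNat c ++ rest' := by
          simp [hl1]
        simp only [List.nil_append, hrep]
        rw [scanA_run_hit none c l.toNat (by omega) (by simp)]
      · have hstep : checkTripAltLoop l t (c :: rest') run prev
            = checkTripAltLoop l t rest' 1 (some c) := by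
          rw [checkTripAltLoop]; simp [ht, hmatch, hhit]
        rw [hstep, ih 1 (some c) (Or.inr ⟨c, rfl, by omega, by omega⟩)]
        dsimp only
        rcases hst with ⟨hp, hr⟩ | ⟨p, hp, hr1, hr2⟩
        · subst hp; simp
        · subst hp
          have hcp : c ≠ p := fun h => hmatch (by rw [h])
          rw [scanA_peel none p c (by simp) hcp l.toNat run.toNat (by omega)]
          simp

-- ===== VERDICT (by name: the statement is the Claim_ definition above) =====
theorem check_trip_spec : Claim_equal_check_trip := by
  intro s l t _hDom hPre
  unfold Spec_check_trip Pre_check_trip at *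
  unfold check_trip check_trip_alt
  cases t with
  | none =>
    rw [A_bridge s.toList l none none
          (by intro c0 x; simp only [targA]; constructor <;> (intro h; simp_all)) hPre
          s.toList.length 0 (by omega) (by omega)]
    simp only [Int.toNat_zero, List.drop_zero]
    rw [B_falsy l none (by simp) hPre s.toList 0 none (Or.inl ⟨rfl, rfl⟩)]
    simp
  | some ts =>
    cases hts : ts.toList with
    | nil =>
      rw [A_bridge s.toList l (some ts) none
            (by intro c0 x; simp only [targA, hts]; constructor <;> (intro h; simp_all)) hPre
            s.toList.length 0 (by omega) (by omega)]
      simp only [Int.toNat_zero, List.drop_zero]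
      rw [B_falsy l (some ts) (by simp [hts]) hPre s.toList 0 none (Or.inl ⟨rfl, rfl⟩)]
      simp
    | cons a as =>
      cases as with
      | nil =>
        rw [A_bridge s.toList l (some ts) (some a)
              (by intro c0 x; simp only [targA, hts]
                  constructor <;> (intro h; simp_all)) hPre
              s.toList.length 0 (by omega) (by omega)]
        simp only [Int.toNat_zero, List.drop_zero]
        rw [B_truthy l ts a hts hPre s.toList 0 none (by omega) (by omega)]
        simp
      | cons b bs =>
        rw [A_multi s.toList l ts a b bs hts
              ((s.toList.length : Int) - l + 1).toNat 0 (by omega)]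
        rw [B_multi l ts a b bs hts hPre]
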